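-- pv_equiv track=rewrite | github.com/jaiden06/PasswordVerification | websitePassword.py | passLength
-- ===== SOURCE A (Python) =====
-- def containsDigit(passwordList):
--     """Accepts a list of passwords and returns a sorted list of passwords where those passwords containing digits are accepted and the rest are rejected."""
--     AcceptedList = []
--     RejectedList = []
--     containsDigit = False
--     for password in passwordList:
--         passwordContainsDigit = False
--         for individualCharacter in password:
--             if individualCharacter.isdigit():
--                 passwordContainsDigit = True
--         if passwordContainsDigit: # vs. if containsDigit == True:      containsDigit (True / False)
--             AcceptedList.append(password)
--         else: # elif containsDigit == False
--             RejectedList.append(password)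
--     AcceptedRejectedList = [RejectedList, AcceptedList]
--     return AcceptedRejectedList
--
-- def passLength(passwordList):
--     x = containsDigit(passwordList)
--     AcceptedList = x[1]
--     RejectedList = x[0]
--     for position, password in enumerate(AcceptedList):
--         if len(password) <= 5 or len(password) >= 13:
--             AcceptedList.pop(position)
--             AcceptedList.insert(position, None)
--             RejectedList.append(password)
--     AcceptedRejectedList = [RejectedList, AcceptedList]
--     return AcceptedRejectedList
-- ===== SOURCE B (Python) =====
-- def passLength(passwordList):
--     accepted = []
--     no_digit = []
--     bad_length = []
--     for password in passwordList:
--         if any(ch.isdigit() for ch in password):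
--             if 5 < len(password) < 13:
--                 accepted.append(password)
--             else:
--                 accepted.append(None)
--                 bad_length.append(password)
--         else:
--             no_digit.append(password)
--     return [no_digit + bad_length, accepted]
-- ===== Notes on version B (the rewrite author's own statement) =====
-- stated objective: simpler
-- what changed: A classifies by digit presence in one helper pass and then re-filters the accepted list for length with pop/insert mutation; B does everything in a single pass over the input, maintaining accepted, no-digit and bad-length lists and concatenating the two reject lists at the end.
import Mathlib
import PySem

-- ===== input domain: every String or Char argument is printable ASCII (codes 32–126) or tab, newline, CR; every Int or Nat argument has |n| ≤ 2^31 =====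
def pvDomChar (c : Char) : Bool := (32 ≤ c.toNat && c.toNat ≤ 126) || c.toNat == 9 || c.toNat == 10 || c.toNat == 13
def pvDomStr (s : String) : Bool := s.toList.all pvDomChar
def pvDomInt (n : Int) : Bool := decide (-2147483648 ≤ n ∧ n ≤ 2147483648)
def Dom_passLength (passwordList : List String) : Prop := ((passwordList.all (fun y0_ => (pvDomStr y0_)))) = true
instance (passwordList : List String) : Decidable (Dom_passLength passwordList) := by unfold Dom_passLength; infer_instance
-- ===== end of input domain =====

-- B replaces A's classify-then-refilter two-pass design by a single pass keeping
-- three lists (accepted / no-digit / bad-length); same return value, simpler flow.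

-- ===== PORT A =====
-- helper containsDigit: the inner char loop is the foldl, appends become ++ [·]
def containsDigitPort (passwordList : List String) : List String × List String :=
  passwordList.foldl
    (fun st password =>
      let passwordContainsDigit :=
        password.toList.foldl (fun b c => if PySem.Chars.isdigit c then true else b) false
      if passwordContainsDigit then (st.1 ++ [password], st.2)
      else (st.1, st.2 ++ [password]))
    ([], [])

-- A's enumerate loop mutates AcceptedList only at the current index (pop+insert of
-- equal length), so each iteration reads the ORIGINAL element; it is transcribed as
-- a left fold over the accepted list rebuilding it, with rejects appended as in A.
def passLength (passwordList : List String) : List (List (Option String)) :=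
  let x := containsDigitPort passwordList
  let acceptedList := x.1
  let rejectedList := x.2
  let final := acceptedList.foldl
    (fun (st : List (Option String) × List String) password =>
      if PySem.Str.len password ≤ 5 ∨ PySem.Str.len password ≥ 13 then
        (st.1 ++ [none], st.2 ++ [password])
      else (st.1 ++ [some password], st.2))
    ([], rejectedList)
  [final.2.map some, final.1]

-- ===== PORT B =====
def passLength_alt (passwordList : List String) : List (List (Option String)) :=
  let st := passwordList.foldl
    (fun (st : List (Option String) × List String × List String) password =>
      if password.toList.any PySem.Chars.isdigit then
        if 5 < PySem.Str.len password ∧ PySem.Str.len password < 13 then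
          (st.1 ++ [some password], st.2.1, st.2.2)
        else
          (st.1 ++ [none], st.2.1, st.2.2 ++ [password])
      else (st.1, st.2.1 ++ [password], st.2.2))
    ([], [], [])
  [(st.2.1 ++ st.2.2).map some, st.1]

-- ===== PRECONDITION & SPEC =====
def Spec_passLength (passwordList : List String) (out : List (List (Option String))) : Prop := out = passLength_alt passwordList
instance (passwordList : List String) (out : List (List (Option String))) : Decidable (Spec_passLength passwordList out) := by unfold Spec_passLength; infer_instance

-- ===== CLAIM (what is proved, stated in full; the proofs are below) =====
def Claim_equal_passLength : Prop := ∀ (passwordList : List String), Dom_passLength passwordList → Spec_passLength passwordList (passLength passwordList)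

-- ===== LEMMAS AND PROOFS =====

-- A's char loop computes "some char is a digit"
theorem hasDigit_foldl (cs : List Char) (b : Bool) :
    cs.foldl (fun b c => if PySem.Chars.isdigit c then true else b) b
      = (b || cs.any PySem.Chars.isdigit) := by
  induction cs generalizing b with
  | nil => simp
  | cons c cs ih =>
    simp only [List.foldl_cons, List.any_cons, ih]
    by_cases h : PySem.Chars.isdigit c <;> simp [h]

-- closed form of A's containsDigit fold
theorem containsDigitPort_eq (xs : List String) (a r : List String) :
    xs.foldl
      (fun st password =>
        let passwordContainsDigit :=
          password.toList.foldl (fun b c => if PySem.Chars.isdigit c then true else b) false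
        if passwordContainsDigit then (st.1 ++ [password], st.2)
        else (st.1, st.2 ++ [password]))
      (a, r)
    = (a ++ xs.filter (fun s => s.toList.any PySem.Chars.isdigit),
       r ++ xs.filter (fun s => ! s.toList.any PySem.Chars.isdigit)) := by
  have hfun : (fun (st : List String × List String) (password : String) =>
      let passwordContainsDigit :=
        password.toList.foldl (fun b c => if PySem.Chars.isdigit c then true else b) false
      if passwordContainsDigit then (st.1 ++ [password], st.2)
      else (st.1, st.2 ++ [password]))
      = (fun (st : List String × List String) (password : String) =>
        if password.toList.any PySem.Chars.isdigit then (st.1 ++ [password], st.2)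
        else (st.1, st.2 ++ [password])) := by
    funext st password
    rw [hasDigit_foldl, Bool.false_or]
  rw [hfun]
  induction xs generalizing a r with
  | nil => simp
  | cons x xs ih =>
    rw [List.foldl_cons]
    by_cases h : x.toList.any PySem.Chars.isdigit = true
    · rw [if_pos h, ih]
      simp [List.filter_cons, h, List.append_assoc]
    · rw [if_neg h, ih]
      simp only [Bool.not_eq_true] at h
      simp [List.filter_cons, h, List.append_assoc]

-- closed form of A's length loop
theorem lenLoop_eq (ys : List String) (a : List (Option String)) (r : List String) :
    ys.foldl
      (fun (st : List (Option String) × List String) password =>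
        if PySem.Str.len password ≤ 5 ∨ PySem.Str.len password ≥ 13 then
          (st.1 ++ [none], st.2 ++ [password])
        else (st.1 ++ [some password], st.2))
      (a, r)
    = (a ++ ys.map (fun s => if PySem.Str.len s ≤ 5 ∨ PySem.Str.len s ≥ 13 then none else some s),
       r ++ ys.filter (fun s => decide (PySem.Str.len s ≤ 5 ∨ PySem.Str.len s ≥ 13))) := by
  induction ys generalizing a r with
  | nil => simp
  | cons y ys ih =>
    rw [List.foldl_cons]
    by_cases h : PySem.Str.len y ≤ 5 ∨ PySem.Str.len y ≥ 13
    · rw [if_pos h, ih]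
      simp at h
      simp [List.filter_cons, List.map_cons, List.append_assoc, h] <;> omega
    · rw [if_neg h, ih]
      simp at h
      simp [List.filter_cons, List.map_cons, List.append_assoc, h] <;> omega

-- closed form of B's single pass
theorem altLoop_eq (xs : List String) (a : List (Option String)) (nd bl : List String) :
    xs.foldl
      (fun (st : List (Option String) × List String × List String) password =>
        if password.toList.any PySem.Chars.isdigit then
          if 5 < PySem.Str.len password ∧ PySem.Str.len password < 13 then
            (st.1 ++ [some password], st.2.1, st.2.2)
          else
            (st.1 ++ [none], st.2.1, st.2.2 ++ [password])
        else (st.1, st.2.1 ++ [password], st.2.2))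
      (a, nd, bl)
    = (a ++ (xs.filter (fun s => s.toList.any PySem.Chars.isdigit)).map
          (fun s => if 5 < PySem.Str.len s ∧ PySem.Str.len s < 13 then some s else none),
       nd ++ xs.filter (fun s => ! s.toList.any PySem.Chars.isdigit),
       bl ++ (xs.filter (fun s => s.toList.any PySem.Chars.isdigit)).filter
          (fun s => ! decide (5 < PySem.Str.len s ∧ PySem.Str.len s < 13))) := by
  induction xs generalizing a nd bl with
  | nil => simp
  | cons x xs ih =>
    rw [List.foldl_cons]
    by_cases h : x.toList.any PySem.Chars.isdigit = true
    · by_cases h2 : 5 < PySem.Str.len x ∧ PySem.Str.len x < 13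
      · rw [if_pos h, if_pos h2, ih]
        simp at h2
        simp [List.filter_cons, h, h2, List.append_assoc] <;> omega
      · rw [if_pos h, if_neg h2, ih]
        simp at h2
        simp [List.filter_cons, h, h2, List.append_assoc] <;> omega
    · rw [if_neg h, ih]
      simp only [Bool.not_eq_true] at h
      simp [List.filter_cons, h, List.append_assoc]

-- ===== VERDICT (by name: the statement is the Claim_ definition above) =====
theorem passLength_spec : Claim_equal_passLength := by
  intro xs _
  show passLength xs = passLength_alt xs
  have hfilter :
      (xs.filter (fun s => s.toList.any PySem.Chars.isdigit)).filter
          (fun s => decide (PySem.Str.len s ≤ 5 ∨ PySem.Str.len s ≥ 13))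
        = (xs.filter (fun s => s.toList.any PySem.Chars.isdigit)).filter
          (fun s => ! decide (5 < PySem.Str.len s ∧ PySem.Str.len s < 13)) := by
    apply List.filter_congr
    intro s _
    by_cases hb : s.length ≤ 5 ∨ 13 ≤ s.length
    · have hg : ¬ (5 < s.length ∧ s.length < 13) := by omega
      simp [hb, hg]
    · have hg : 5 < s.length ∧ s.length < 13 := by omega
      simp [hb, hg]
  have hmap :
      ((xs.filter (fun s => s.toList.any PySem.Chars.isdigit)).map
          (fun s => if PySem.Str.len s ≤ 5 ∨ PySem.Str.len s ≥ 13 then none else some s))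
        = (xs.filter (fun s => s.toList.any PySem.Chars.isdigit)).map
          (fun s => if 5 < PySem.Str.len s ∧ PySem.Str.len s < 13 then some s else none) := by
    apply List.map_congr_left
    intro s _
    by_cases hb : s.length ≤ 5 ∨ 13 ≤ s.length
    · have hg : ¬ (5 < s.length ∧ s.length < 13) := by omega
      simp [hb, hg]
    · have hg : 5 < s.length ∧ s.length < 13 := by omega
      simp [hb, hg]
  simp only [passLength, passLength_alt, containsDigitPort, containsDigitPort_eq,
    lenLoop_eq, altLoop_eq, List.nil_append, hfilter, hmap]
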